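-- pv_equiv track=rewrite | github.com/microsoft/presidio | presidio-analyzer/presidio_analyzer/entity_recognizer.py | __add_n_words
-- ===== SOURCE A (Python) =====
-- from typing import List, Dict
--
-- def __add_n_words(
--     index: int,
--     n_words: int,
--     lemmas: List[str],
--     lemmatized_filtered_keywords: List[str],
--     is_backward: bool,
-- ) -> List[str]:
--     """
--     Prepare a string of context words.
--
--     Return a list of words which surrounds a lemma at a given index.
--     The words will be collected only if exist in the filtered array
--
--     :param index: index of the lemma that its surrounding words we want
--     :param n_words: number of words to take
--     :param lemmas: array of lemmas
--     :param lemmatized_filtered_keywords: the array of filtered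
--            lemmas from the original sentence,
--     :param is_backward: if true take the preceeding words, if false,
--                         take the successing words
--     """
--     i = index
--     context_words = []
--     # The entity itself is no interest to us...however we want to
--     # consider it anyway for cases were it is attached with no spaces
--     # to an interesting context word, so we allow it and add 1 to
--     # the number of collected words
--
--     # collect at most n words (in lower case)
--     remaining = n_words + 1
--     while 0 <= i < len(lemmas) and remaining > 0:
--         lower_lemma = lemmas[i].lower()
--         if lower_lemma in lemmatized_filtered_keywords:
--             context_words.append(lower_lemma)
--             remaining -= 1
--         i = i - 1 if is_backward else i + 1
--     return context_words
-- ===== SOURCE B (Python) =====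
-- def __add_n_words(
--     index,
--     n_words,
--     lemmas,
--     lemmatized_filtered_keywords,
--     is_backward,
-- ):
--     if not (0 <= index < len(lemmas)):
--         return []
--     idxs = range(index, -1, -1) if is_backward else range(index, len(lemmas))
--     words = [lemmas[i].lower() for i in idxs]
--     hits = [w for w in words if w in lemmatized_filtered_keywords]
--     return hits[:max(0, n_words + 1)]
-- ===== Notes on version B (the rewrite author's own statement) =====
-- stated objective: alternative
-- what changed: Replaces the stateful while-loop (cursor, remaining counter, in-loop direction branch) with a pipeline: build the index range for the chosen direction once, lowercase-map it, filter by keyword membership, and slice off the first n_words+1 hits.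
import Mathlib
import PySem

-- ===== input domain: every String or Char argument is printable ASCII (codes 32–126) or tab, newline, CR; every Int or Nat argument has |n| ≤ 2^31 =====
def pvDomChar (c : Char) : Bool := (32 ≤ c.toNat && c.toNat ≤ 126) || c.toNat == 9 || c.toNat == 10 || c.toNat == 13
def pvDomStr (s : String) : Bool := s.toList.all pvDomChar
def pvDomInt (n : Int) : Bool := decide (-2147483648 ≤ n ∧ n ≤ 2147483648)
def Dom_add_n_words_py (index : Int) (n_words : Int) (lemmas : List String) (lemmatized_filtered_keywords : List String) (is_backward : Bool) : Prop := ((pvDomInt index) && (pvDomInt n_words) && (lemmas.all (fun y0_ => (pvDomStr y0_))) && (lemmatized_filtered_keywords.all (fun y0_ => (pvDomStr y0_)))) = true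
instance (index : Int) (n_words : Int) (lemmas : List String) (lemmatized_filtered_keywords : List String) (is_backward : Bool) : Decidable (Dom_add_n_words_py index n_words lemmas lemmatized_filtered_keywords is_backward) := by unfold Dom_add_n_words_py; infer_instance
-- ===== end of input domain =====

-- B replaces A's stateful while-loop (cursor + remaining counter + in-loop direction
-- branch) with a pipeline: directional index range, lowercase map, keyword filter,
-- then a prefix slice of n_words+1 hits (objective: alternative decomposition).

-- ===== PORT A =====
-- A's while loop: state (i, remaining, context_words); each iteration reads
-- lemmas[i] (always in range here), optionally appends, then steps i by ±1.
def aLoop (lemmas kw : List String) (bw : Bool) (i remaining : Int) (acc : List String) : List String :=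
  if h : 0 ≤ i ∧ i < (lemmas.length : Int) ∧ 0 < remaining then
    let lw := PySem.Str.lower (PySem.List.pyGetD lemmas i "")
    if kw.contains lw then
      aLoop lemmas kw bw (if bw then i - 1 else i + 1) (remaining - 1) (acc ++ [lw])
    else
      aLoop lemmas kw bw (if bw then i - 1 else i + 1) remaining acc
  else acc
termination_by (if bw then (i + 1).toNat else ((lemmas.length : Int) - i).toNat)
decreasing_by all_goals (cases bw <;> simp_all)

def add_n_words_py (index : Int) (n_words : Int) (lemmas : List String) (lemmatized_filtered_keywords : List String) (is_backward : Bool) : List String :=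
  aLoop lemmas lemmatized_filtered_keywords is_backward index (n_words + 1) []

-- ===== PORT B =====
def add_n_words_py_alt (index : Int) (n_words : Int) (lemmas : List String) (lemmatized_filtered_keywords : List String) (is_backward : Bool) : List String :=
  if 0 ≤ index ∧ index < (lemmas.length : Int) then
    let idxs := if is_backward then PySem.List.pyRange index (-1) (-1)
                else PySem.List.pyRange index (lemmas.length : Int) 1
    let words := idxs.map (fun i => PySem.Str.lower (PySem.List.pyGetD lemmas i ""))
    let hits := words.filter (fun w => lemmatized_filtered_keywords.contains w)
    hits.take (max 0 (n_words + 1)).toNat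
  else []

-- ===== PRECONDITION & SPEC =====
def Spec_add_n_words_py (index : Int) (n_words : Int) (lemmas : List String) (lemmatized_filtered_keywords : List String) (is_backward : Bool) (out : List String) : Prop := out = add_n_words_py_alt index n_words lemmas lemmatized_filtered_keywords is_backward
instance (index : Int) (n_words : Int) (lemmas : List String) (lemmatized_filtered_keywords : List String) (is_backward : Bool) (out : List String) : Decidable (Spec_add_n_words_py index n_words lemmas lemmatized_filtered_keywords is_backward out) := by unfold Spec_add_n_words_py; infer_instance

-- ===== CLAIM (what is proved, stated in full; the proofs are below) =====
def Claim_equal_add_n_words_py : Prop := ∀ (index : Int) (n_words : Int) (lemmas : List String) (lemmatized_filtered_keywords : List String) (is_backward : Bool), Dom_add_n_words_py index n_words lemmas lemmatized_filtered_keywords is_backward → Spec_add_n_words_py index n_words lemmas lemmatized_filtered_keywords is_backward (add_n_words_py index n_words lemmas lemmatized_filtered_keywords is_backward)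

-- ===== LEMMAS AND PROOFS =====

-- B's filtered stream of hits starting at index i.
def hitsFrom (lemmas kw : List String) (bw : Bool) (i : Int) : List String :=
  ((if bw then PySem.List.pyRange i (-1) (-1)
    else PySem.List.pyRange i (lemmas.length : Int) 1).map
      (fun j => PySem.Str.lower (PySem.List.pyGetD lemmas j ""))).filter
    (fun w => kw.contains w)

-- Loop invariant: A's loop appends to acc the first `remaining` hits from i.
theorem aLoop_eq (lemmas kw : List String) (bw : Bool) :
    ∀ (i remaining : Int) (acc : List String),
      (if bw then i < (lemmas.length : Int) else 0 ≤ i) →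
      aLoop lemmas kw bw i remaining acc
        = acc ++ (hitsFrom lemmas kw bw i).take remaining.toNat := by
  intro i remaining acc hdir
  induction i, remaining, acc using aLoop.induct lemmas kw bw with
  | case1 i remaining acc h lw hit ih =>
    obtain ⟨h1, h2, h3⟩ := h
    rw [aLoop]
    simp only [dite_eq_ite] at ih ⊢
    rw [if_pos (⟨h1, h2, h3⟩ : 0 ≤ i ∧ i < (lemmas.length : Int) ∧ 0 < remaining)]
    rw [if_pos (show kw.contains (PySem.Str.lower (PySem.List.pyGetD lemmas i "")) = true from hit)]
    rw [ih (by cases bw <;> simp_all <;> omega)]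
    have hcons : hitsFrom lemmas kw bw i
        = PySem.Str.lower (PySem.List.pyGetD lemmas i "")
            :: hitsFrom lemmas kw bw (if bw then i - 1 else i + 1) := by
      unfold hitsFrom
      cases bw <;> simp only [if_true, if_false, Bool.false_eq_true]
      · rw [PySem.List.pyRange_one_cons (by omega)]
        simp only [List.map_cons, List.filter_cons]
        rw [if_pos (by simpa [lw] using hit)]
      · rw [PySem.List.pyRange_neg_one_cons (by omega)]
        simp only [List.map_cons, List.filter_cons]
        rw [if_pos (by simpa [lw] using hit)]
    rw [hcons]
    have ht : remaining.toNat = (remaining - 1).toNat + 1 := by omega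
    rw [ht, List.take_succ_cons, List.append_assoc]
    rfl
  | case2 i remaining acc h lw miss ih =>
    obtain ⟨h1, h2, h3⟩ := h
    rw [aLoop]
    simp only [dite_eq_ite] at ih ⊢
    rw [if_pos (⟨h1, h2, h3⟩ : 0 ≤ i ∧ i < (lemmas.length : Int) ∧ 0 < remaining)]
    rw [if_neg (show ¬ kw.contains (PySem.Str.lower (PySem.List.pyGetD lemmas i "")) = true from miss)]
    rw [ih (by cases bw <;> simp_all <;> omega)]
    have hcons : hitsFrom lemmas kw bw i
        = hitsFrom lemmas kw bw (if bw then i - 1 else i + 1) := by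
      unfold hitsFrom
      cases bw <;> simp only [if_true, if_false, Bool.false_eq_true]
      · rw [PySem.List.pyRange_one_cons (by omega)]
        simp only [List.map_cons, List.filter_cons]
        rw [if_neg (by simpa [lw] using miss)]
      · rw [PySem.List.pyRange_neg_one_cons (by omega)]
        simp only [List.map_cons, List.filter_cons]
        rw [if_neg (by simpa [lw] using miss)]
    rw [hcons]
  | case3 i remaining acc h =>
    rw [aLoop, dif_neg h]
    by_cases hr : 0 < remaining
    · have hnil : hitsFrom lemmas kw bw i = [] := by
        unfold hitsFrom
        cases bw <;> simp only [if_true, if_false, Bool.false_eq_true] at hdir ⊢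
        · rw [PySem.List.pyRange_one_eq_nil (by omega)]; rfl
        · rw [PySem.List.pyRange_neg_one_eq_nil (by omega)]; rfl
      simp [hnil]
    · have ht : remaining.toNat = 0 := by omega
      simp [ht]

-- ===== VERDICT (by name: the statement is the Claim_ definition above) =====
theorem add_n_words_py_spec : Claim_equal_add_n_words_py := by
  intro index n_words lemmas kw bw _
  unfold Spec_add_n_words_py add_n_words_py add_n_words_py_alt
  by_cases h : 0 ≤ index ∧ index < (lemmas.length : Int)
  · rw [if_pos h, aLoop_eq lemmas kw bw index (n_words + 1) []
      (by cases bw <;> simp <;> omega)]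
    have : (max 0 (n_words + 1)).toNat = (n_words + 1).toNat := by omega
    rw [this]
    rfl
  · rw [if_neg h, aLoop, dif_neg (by intro hc; exact h ⟨hc.1, hc.2.1⟩)]
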